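-- pv_equiv track=rewrite | github.com/WhiteNight123/SICP | proj02-Code/cats.py | sphinx_fixes
-- ===== SOURCE A (Python) =====
-- def sphinx_fixes(typed, source, limit):
--     """A diff function for autocorrect that determines how many letters
--     in TYPED need to be substituted to create SOURCE, then adds the difference in
--     their lengths and returns the result.
--
--     Arguments:
--         typed: a starting word
--         source: a string representing a desired goal word
--         limit: a number representing an upper bound on the number of chars that must change
--
--     >>> big_limit = 10
--     >>> sphinx_fixes("nice", "rice", big_limit)    # Substitute: n -> r
--     1
--     >>> sphinx_fixes("range", "rungs", big_limit)  # Substitute: a -> u, e -> s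
--     2
--     >>> sphinx_fixes("pill", "pillage", big_limit) # Don't substitute anything, length difference of 3.
--     3
--     >>> sphinx_fixes("roses", "arose", big_limit)  # Substitute: r -> a, o -> r, s -> o, e -> s, s -> e
--     5
--     >>> sphinx_fixes("rose", "hello", big_limit)   # Substitute: r->h, o->e, s->l, e->l, length difference of 1.
--     5
--     """
--     # BEGIN PROBLEM 6
--     if limit < 0:
--         return 0
--     if len(typed) == 0:
--         return len(source)
--     if len(source) == 0:
--         return len(typed)
--     if typed[0] == source[0]:
--         return sphinx_fixes(typed[1:], source[1:], limit)
--     return 1 + sphinx_fixes(typed[1:], source[1:], limit - 1)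
-- ===== SOURCE B (Python) =====
-- def sphinx_fixes(typed, source, limit):
--     if limit < 0:
--         return 0
--     count = 0
--     n = min(len(typed), len(source))
--     i = 0
--     while i < n:
--         if typed[i] != source[i]:
--             if limit == 0:
--                 return count + 1
--             count += 1
--             limit -= 1
--         i += 1
--     return count + abs(len(typed) - len(source))
-- ===== Notes on version B (the rewrite author's own statement) =====
-- stated objective: faster
-- what changed: Replaces the slicing recursion with a single index loop over the common prefix carrying a running count and limit, returning count + length difference at the end.
import Mathlib
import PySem

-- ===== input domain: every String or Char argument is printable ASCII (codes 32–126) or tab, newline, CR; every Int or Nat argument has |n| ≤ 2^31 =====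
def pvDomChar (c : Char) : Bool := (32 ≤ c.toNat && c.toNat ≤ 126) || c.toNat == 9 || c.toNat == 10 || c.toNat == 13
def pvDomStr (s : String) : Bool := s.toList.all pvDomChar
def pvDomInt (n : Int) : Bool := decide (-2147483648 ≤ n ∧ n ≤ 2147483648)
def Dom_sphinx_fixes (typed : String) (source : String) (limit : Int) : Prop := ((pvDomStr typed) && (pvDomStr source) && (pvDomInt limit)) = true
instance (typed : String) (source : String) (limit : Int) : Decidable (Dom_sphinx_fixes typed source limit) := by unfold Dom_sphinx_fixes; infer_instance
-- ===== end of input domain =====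

-- B replaces A's slicing recursion by one index loop with a running count and limit (faster: O(n) vs O(n^2)).

-- ===== PORT A =====
-- literal transliteration of A's recursion (strings as char lists, slicing [1:] = tail)
def sphinxA : List Char → List Char → Int → Int
  | t, s, limit =>
    if limit < 0 then 0
    else match t, s with
      | [], s => (s.length : Int)
      | t, [] => (t.length : Int)
      | a :: t', b :: s' =>
        if a == b then sphinxA t' s' limit
        else 1 + sphinxA t' s' (limit - 1)

def sphinx_fixes (typed : String) (source : String) (limit : Int) : Int :=
  sphinxA typed.toList source.toList limit

-- ===== PORT B =====
-- B's while loop over the common prefix, carrying count and the running limit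
def sphinxB : List Char → List Char → Int → Int → Int
  | a :: t, b :: s, limit, count =>
    if a ≠ b then
      if limit == 0 then count + 1
      else sphinxB t s (limit - 1) (count + 1)
    else sphinxB t s limit count
  | t, s, _, count => count + ((t.length : Int) - (s.length : Int)).natAbs

def sphinx_fixes_alt (typed : String) (source : String) (limit : Int) : Int :=
  if limit < 0 then 0
  else sphinxB typed.toList source.toList limit 0

-- ===== PRECONDITION & SPEC =====
def Spec_sphinx_fixes (typed : String) (source : String) (limit : Int) (out : Int) : Prop := out = sphinx_fixes_alt typed source limit
instance (typed : String) (source : String) (limit : Int) (out : Int) : Decidable (Spec_sphinx_fixes typed source limit out) := by unfold Spec_sphinx_fixes; infer_instance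

-- ===== CLAIM (what is proved, stated in full; the proofs are below) =====
def Claim_equal_sphinx_fixes : Prop := ∀ (typed : String) (source : String) (limit : Int), Dom_sphinx_fixes typed source limit → Spec_sphinx_fixes typed source limit (sphinx_fixes typed source limit)

-- ===== LEMMAS AND PROOFS =====
theorem sphinxA_eq_sphinxB (t : List Char) : ∀ (s : List Char) (limit count : Int),
    0 ≤ limit → count + sphinxA t s limit = sphinxB t s limit count := by
  induction t with
  | nil =>
    intro s limit count h
    simp [sphinxA, sphinxB, not_lt.mpr h]
  | cons a t ih =>
    intro s limit count h
    cases s with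
    | nil =>
      simp [sphinxA, sphinxB, not_lt.mpr h]
      rw [abs_of_nonneg (by positivity)]
    | cons b s =>
      by_cases hab : a = b
      · simp only [sphinxA, sphinxB, not_lt.mpr h, if_false, hab, beq_self_eq_true, if_true,
          ne_eq, not_true_eq_false]
        exact ih s limit count h
      · have hne : (a == b) = false := beq_eq_false_iff_ne.mpr hab
        simp only [sphinxA, sphinxB, not_lt.mpr h, if_false, hne, Bool.false_eq_true, ne_eq,
          hab, not_false_eq_true, if_true]
        by_cases hz : limit = 0
        · subst hz
          rw [show sphinxA t s ((0:Int) - 1) = 0 by rw [sphinxA.eq_def]; norm_num]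
          simp
        · have h1 : (0:Int) ≤ limit - 1 := by omega
          have hzb : (limit == (0:Int)) = false := by
            simp [beq_eq_false_iff_ne, hz]
          rw [hzb]
          simp only [Bool.false_eq_true, if_false]
          rw [← ih s (limit - 1) (count + 1) h1]
          ring

-- ===== VERDICT (by name: the statement is the Claim_ definition above) =====
theorem sphinx_fixes_spec : Claim_equal_sphinx_fixes := by
  unfold Claim_equal_sphinx_fixes
  intro typed source limit _
  unfold Spec_sphinx_fixes sphinx_fixes sphinx_fixes_alt
  by_cases h : limit < 0
  · rw [sphinxA.eq_def]; simp [h]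
  · have h0 : 0 ≤ limit := by omega
    rw [if_neg h, ← sphinxA_eq_sphinxB _ _ _ 0 h0, zero_add]
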